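-- pv_equiv track=rewrite | github.com/MMI122/electronicstore-text-to-sql- | backend/routes/ai_query.py | _extract_sql
-- ===== SOURCE A (Python) =====
-- def _extract_sql(generated_text, prompt):
--     """Extract SQL from AI-generated text"""
--     # Remove the prompt from response
--     sql = generated_text.replace(prompt, '').strip()
--
--     # Remove markdown code blocks
--     sql = sql.replace('```sql', '').replace('```', '').strip()
--
--     # Extract only the SQL query
--     lines = sql.split('\n')
--     sql_lines = []
--     for line in lines:
--         if any(keyword in line.upper() for keyword in ['SELECT', 'INSERT', 'UPDATE', 'DELETE', 'FROM', 'WHERE', 'JOIN']):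
--             sql_lines.append(line)
--         elif sql_lines:  # Continue if we've started collecting SQL
--             sql_lines.append(line)
--
--     return '\n'.join(sql_lines).strip()
-- ===== SOURCE B (Python) =====
-- def _extract_sql(generated_text, prompt):
--     """Extract SQL from AI-generated text"""
--     sql = generated_text.replace(prompt, '').strip()
--     sql = sql.replace('```sql', '').replace('```', '').strip()
--     lines = sql.split('\n')
--     keywords = ('SELECT', 'INSERT', 'UPDATE', 'DELETE', 'FROM', 'WHERE', 'JOIN')
--     idx = next((i for i, line in enumerate(lines)
--                 if any(k in line.upper() for k in keywords)), None)
--     if idx is None: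
--         return ''
--     return '\n'.join(lines[idx:]).strip()
-- ===== Notes on version B (the rewrite author's own statement) =====
-- stated objective: simpler
-- what changed: The accumulate-lines loop (append on keyword match, then append everything once started) is replaced by finding the index of the first keyword-containing line and joining the tail slice lines[idx:], returning '' when no line matches.
import Mathlib
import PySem

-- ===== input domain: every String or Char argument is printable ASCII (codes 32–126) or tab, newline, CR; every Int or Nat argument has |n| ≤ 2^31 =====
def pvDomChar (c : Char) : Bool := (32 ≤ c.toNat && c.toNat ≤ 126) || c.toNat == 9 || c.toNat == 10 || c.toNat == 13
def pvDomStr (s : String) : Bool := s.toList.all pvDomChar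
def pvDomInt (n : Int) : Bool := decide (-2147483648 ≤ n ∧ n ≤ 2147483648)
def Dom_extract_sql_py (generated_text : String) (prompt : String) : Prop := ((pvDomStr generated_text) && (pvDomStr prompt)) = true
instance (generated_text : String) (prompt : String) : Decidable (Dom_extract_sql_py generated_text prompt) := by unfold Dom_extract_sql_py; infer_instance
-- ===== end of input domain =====

-- B replaces A's accumulate-lines loop by finding the first keyword line's index and joining the tail slice (simpler decomposition, same cost).

-- shared helper: the prompt/markdown stripping both Pythons perform verbatim
def pvCleanSql (generated_text : String) (prompt : String) : String :=
  let sql := PySem.Str.strip (PySem.Str.replace generated_text prompt "")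
  PySem.Str.strip (PySem.Str.replace (PySem.Str.replace sql "```sql" "") "```" "")

-- any(keyword in line.upper() for keyword in [...])
def pvLineHasKw (line : String) : Bool :=
  ["SELECT", "INSERT", "UPDATE", "DELETE", "FROM", "WHERE", "JOIN"].any
    (fun k => PySem.Str.isIn k (PySem.Str.upper line))

-- ===== PORT A =====
def extract_sql_py (generated_text : String) (prompt : String) : String :=
  let sql := pvCleanSql generated_text prompt
  let lines := (PySem.Str.split? sql "\n").getD []
  let sql_lines := lines.foldl
    (fun acc line =>
      if pvLineHasKw line then acc ++ [line]
      else if acc ≠ [] then acc ++ [line]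
      else acc) []
  PySem.Str.strip (PySem.Str.join "\n" sql_lines)

-- ===== PORT B =====
-- 'if idx is None: return "" ; return "\n".join(lines[idx:]).strip()'
def pvTailFromFirstKw (lines : List String) : String :=
  match lines.findIdx? pvLineHasKw with
  | none => ""
  | some i => PySem.Str.strip (PySem.Str.join "\n" (lines.drop i))

def extract_sql_py_alt (generated_text : String) (prompt : String) : String :=
  let sql := pvCleanSql generated_text prompt
  let lines := (PySem.Str.split? sql "\n").getD []
  pvTailFromFirstKw lines

-- ===== PRECONDITION & SPEC =====
def Spec_extract_sql_py (generated_text : String) (prompt : String) (out : String) : Prop := out = extract_sql_py_alt generated_text prompt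
instance (generated_text : String) (prompt : String) (out : String) : Decidable (Spec_extract_sql_py generated_text prompt out) := by unfold Spec_extract_sql_py; infer_instance

-- ===== CLAIM (what is proved, stated in full; the proofs are below) =====
def Claim_equal_extract_sql_py : Prop := ∀ (generated_text : String) (prompt : String), Dom_extract_sql_py generated_text prompt → Spec_extract_sql_py generated_text prompt (extract_sql_py generated_text prompt)

-- ===== LEMMAS AND PROOFS =====

-- once the accumulator is nonempty, A's loop appends every remaining line
lemma foldl_keep_all (l : List String) (acc : List String) (h : acc ≠ []) :
    l.foldl (fun acc line =>
      if pvLineHasKw line then acc ++ [line]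
      else if acc ≠ [] then acc ++ [line]
      else acc) acc = acc ++ l := by
  induction l generalizing acc with
  | nil => simp
  | cons hd tl ih =>
    simp only [List.foldl_cons]
    have hstep : (if pvLineHasKw hd = true then acc ++ [hd]
        else if acc ≠ [] then acc ++ [hd] else acc) = acc ++ [hd] := by
      split_ifs <;> simp_all
    rw [hstep, ih _ (by simp)]
    simp

-- A's loop from the empty accumulator computes B's tail slice lines[idx:]
lemma foldl_eq_drop (l : List String) :
    l.foldl (fun acc line =>
      if pvLineHasKw line then acc ++ [line]
      else if acc ≠ [] then acc ++ [line]
      else acc) [] =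
    (match l.findIdx? pvLineHasKw with
     | none => []
     | some i => l.drop i) := by
  induction l with
  | nil => simp
  | cons hd tl ih =>
    by_cases hk : pvLineHasKw hd
    · have h1 : (if pvLineHasKw hd = true then ([] : List String) ++ [hd]
          else if ([] : List String) ≠ [] then [] ++ [hd] else []) = [hd] := by
        simp [hk]
      rw [List.foldl_cons, h1, foldl_keep_all tl [hd] (by simp), List.findIdx?_cons]
      simp [hk]
    · have hstep : (if pvLineHasKw hd = true then ([] : List String) ++ [hd]
          else if ([] : List String) ≠ [] then [] ++ [hd] else []) = [] := by
        simp [hk]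
      rw [List.foldl_cons, hstep, ih, List.findIdx?_cons]
      cases h : tl.findIdx? pvLineHasKw <;> simp [hk]

-- join-and-strip applied to both sides of foldl_eq_drop ('' when no line matches)
lemma join_tail (L : List String) :
    PySem.Str.strip (PySem.Str.join "\n" (L.foldl
      (fun acc line =>
        if pvLineHasKw line then acc ++ [line]
        else if acc ≠ [] then acc ++ [line]
        else acc) [])) = pvTailFromFirstKw L := by
  rw [foldl_eq_drop]
  unfold pvTailFromFirstKw
  cases h : L.findIdx? pvLineHasKw
  · simp only [h]
    decide
  · simp [h]

-- ===== VERDICT (by name: the statement is the Claim_ definition above) =====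
theorem extract_sql_py_spec : Claim_equal_extract_sql_py := by
  intro g p _
  exact join_tail ((PySem.Str.split? (pvCleanSql g p) "\n").getD [])
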